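-- pv_equiv track=rewrite | github.com/Pochingto/advent_of_code_2023 | day1/code.py | find_first_last_digit
-- ===== SOURCE A (Python) =====
-- def find_first_last_digit(line: str) -> tuple[int, int]:
--     first = len(line) + 1
--     last = -1
--     for i, c in enumerate(line):
--         if c.isdigit():
--             if first == len(line) + 1:
--                 first = i
--             last = i
--     return first, last
-- ===== SOURCE B (Python) =====
-- def find_first_last_digit(line: str) -> tuple[int, int]:
--     n = len(line)
--     first = n + 1
--     for i, c in enumerate(line):
--         if c.isdigit():
--             first = i
--             break
--     last = -1
--     for j, c in enumerate(reversed(line)):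
--         if c.isdigit():
--             last = n - 1 - j
--             break
--     return first, last
-- ===== Notes on version B (the rewrite author's own statement) =====
-- stated objective: alternative
-- what changed: Replaced the single accumulating full pass (with a first-already-set guard) by two independent early-exit scans: a forward scan breaking at the first digit and a backward scan over the reversed string breaking at the last digit, keeping the exact sentinels len+1 and -1.
import Mathlib
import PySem

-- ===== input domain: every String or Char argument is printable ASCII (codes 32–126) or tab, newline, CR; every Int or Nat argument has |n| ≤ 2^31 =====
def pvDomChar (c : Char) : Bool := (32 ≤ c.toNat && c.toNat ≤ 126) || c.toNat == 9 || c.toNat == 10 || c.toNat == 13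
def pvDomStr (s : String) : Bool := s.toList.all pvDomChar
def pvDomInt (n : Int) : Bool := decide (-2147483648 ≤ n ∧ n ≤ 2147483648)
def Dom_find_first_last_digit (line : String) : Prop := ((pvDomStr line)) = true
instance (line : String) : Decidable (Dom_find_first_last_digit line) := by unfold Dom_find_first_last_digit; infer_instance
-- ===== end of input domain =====

-- B replaces A's single accumulating pass (with a first-already-set guard) by two
-- independent early-exit scans: forward for the first digit, backward (over the
-- reversed string) for the last; same sentinels len+1 and -1. Objective: alternative.

-- ===== PORT A =====
def find_first_last_digit (line : String) : Int × Int :=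
  let cs := line.toList
  (PySem.List.enumerate cs 0).foldl
    (fun (st : Int × Int) (p : Int × Char) =>
      if PySem.Chars.isdigit p.2 then
        ((if st.1 = (cs.length : Int) + 1 then p.1 else st.1), p.1)
      else st)
    ((cs.length : Int) + 1, -1)

-- ===== PORT B =====
-- forward scan: first index ≥ i whose char is a digit, else the default
def pvFwdScan : List Char → Int → Int → Int
  | [], _, dflt => dflt
  | c :: rest, i, dflt => if PySem.Chars.isdigit c then i else pvFwdScan rest (i + 1) dflt

-- backward scan over the reversed string: j counts from the end, result n-1-j
def pvBwdScan (n : Int) : List Char → Int → Int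
  | [], _ => -1
  | c :: rest, j => if PySem.Chars.isdigit c then n - 1 - j else pvBwdScan n rest (j + 1)

def find_first_last_digit_alt (line : String) : Int × Int :=
  let cs := line.toList
  let n : Int := cs.length
  (pvFwdScan cs 0 (n + 1), pvBwdScan n cs.reverse 0)

-- ===== PRECONDITION & SPEC =====
def Spec_find_first_last_digit (line : String) (out : Int × Int) : Prop := out = find_first_last_digit_alt line
instance (line : String) (out : Int × Int) : Decidable (Spec_find_first_last_digit line out) := by unfold Spec_find_first_last_digit; infer_instance

-- ===== CLAIM (what is proved, stated in full; the proofs are below) =====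
def Claim_equal_find_first_last_digit : Prop := ∀ (line : String), Dom_find_first_last_digit line → Spec_find_first_last_digit line (find_first_last_digit line)

-- ===== LEMMAS AND PROOFS =====

-- proof-side characterisation of the "last" accumulator of A's single pass
def pvLastAux : List Char → Int → Int → Int
  | [], _, l => l
  | c :: cs, k, l => pvLastAux cs (k + 1) (if PySem.Chars.isdigit c then k else l)

lemma pvFoldA_eq (n : Int) :
    ∀ (cs : List Char) (k f l : Int), k + (cs.length : Int) ≤ n →
    (PySem.List.enumerate cs k).foldl
      (fun (st : Int × Int) (p : Int × Char) =>
        if PySem.Chars.isdigit p.2 then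
          ((if st.1 = n + 1 then p.1 else st.1), p.1)
        else st) (f, l)
    = ((if f = n + 1 then pvFwdScan cs k (n + 1) else f), pvLastAux cs k l) := by
  intro cs
  induction cs with
  | nil =>
    intro k f l _
    simp only [PySem.List.enumerate_nil, List.foldl_nil, pvFwdScan, pvLastAux]
    split <;> simp_all
  | cons c cs ih =>
    intro k f l hk
    simp only [PySem.List.enumerate_cons, List.foldl_cons]
    by_cases hd : PySem.Chars.isdigit c
    · simp only [hd, if_pos]
      rw [ih (k + 1) _ k (by push_cast [List.length_cons] at hk ⊢; omega)]
      have hklt : k ≠ n + 1 := by push_cast [List.length_cons] at hk; omega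
      by_cases hf : f = n + 1
      · simp [hf, hklt, pvFwdScan, pvLastAux, hd]
      · simp [hf, pvLastAux, hd]
    · simp only [hd, Bool.false_eq_true, if_false]
      rw [ih (k + 1) f l (by push_cast [List.length_cons] at hk ⊢; omega)]
      simp [pvFwdScan, pvLastAux, hd]

lemma pvLastAux_snoc (c : Char) :
    ∀ (xs : List Char) (k l : Int),
    pvLastAux (xs ++ [c]) k l
      = if PySem.Chars.isdigit c then k + (xs.length : Int) else pvLastAux xs k l := by
  intro xs
  induction xs with
  | nil => intro k l; simp [pvLastAux]
  | cons x xs ih =>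
    intro k l
    simp only [List.cons_append, pvLastAux, ih]
    split <;> [skip; rfl]
    push_cast [List.length_cons]; ring

lemma pvBwdScan_eq_lastAux (n : Int) :
    ∀ (M : List Char) (j : Int), j + (M.length : Int) = n →
    pvBwdScan n M j = pvLastAux M.reverse 0 (-1) := by
  intro M
  induction M with
  | nil => intro j _; simp [pvBwdScan, pvLastAux]
  | cons c M ih =>
    intro j hj
    simp only [pvBwdScan, List.reverse_cons, pvLastAux_snoc]
    split
    · simp only [List.length_reverse]; push_cast [List.length_cons] at hj ⊢; omega
    · exact ih (j + 1) (by push_cast [List.length_cons] at hj ⊢; omega)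

-- ===== VERDICT (by name: the statement is the Claim_ definition above) =====
theorem find_first_last_digit_spec : Claim_equal_find_first_last_digit := by
  intro line _
  unfold Spec_find_first_last_digit find_first_last_digit find_first_last_digit_alt
  set cs := line.toList with hcs
  simp only []
  rw [pvFoldA_eq ((cs.length : Int)) cs 0 ((cs.length : Int) + 1) (-1) (by omega)]
  rw [pvBwdScan_eq_lastAux ((cs.length : Int)) cs.reverse 0 (by simp)]
  simp
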